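-- pv_equiv track=rewrite | github.com/kangminlee-maker/cmis-v2 | cmis_core/belief_engine.py | _is_similar_region
-- ===== SOURCE A (Python) =====
-- def _is_similar_region(region1: str, region2: str) -> bool:
--     """지역 유사도 판단
--
--     같은 지역 그룹이면 True.
--
--     Args:
--         region1: "KR", "US", etc.
--         region2: "KR", "JP", etc.
--
--     Returns:
--         bool
--     """
--     # 지역 그룹 정의
--     region_groups = {
--         "east_asia": ["KR", "JP", "CN", "TW"],
--         "north_america": ["US", "CA"],
--         "europe": ["UK", "DE", "FR", "IT", "ES"],
--         "southeast_asia": ["SG", "TH", "VN", "ID", "MY"]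
--     }
--
--     # 같은 그룹에 속하는지 확인
--     for group_regions in region_groups.values():
--         if region1 in group_regions and region2 in group_regions:
--             return True
--
--     return False
-- ===== SOURCE B (Python) =====
-- def _is_similar_region(region1: str, region2: str) -> bool:
--     """Region similarity via a flat reverse index: code -> group name."""
--     region_groups = {
--         "east_asia": ["KR", "JP", "CN", "TW"],
--         "north_america": ["US", "CA"],
--         "europe": ["UK", "DE", "FR", "IT", "ES"],
--         "southeast_asia": ["SG", "TH", "VN", "ID", "MY"]
--     }
--     group_of = {code: name for name, codes in region_groups.items() for code in codes}
--     g1 = group_of.get(region1)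
--     return g1 is not None and g1 == group_of.get(region2)
-- ===== Notes on version B (the rewrite author's own statement) =====
-- stated objective: idiomatic
-- what changed: B builds a flat reverse-index dict mapping each region code to its group name once, then decides by two lookups and one comparison (guarded against both lookups being None), instead of A's loop over the groups with paired membership tests.
import Mathlib
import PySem

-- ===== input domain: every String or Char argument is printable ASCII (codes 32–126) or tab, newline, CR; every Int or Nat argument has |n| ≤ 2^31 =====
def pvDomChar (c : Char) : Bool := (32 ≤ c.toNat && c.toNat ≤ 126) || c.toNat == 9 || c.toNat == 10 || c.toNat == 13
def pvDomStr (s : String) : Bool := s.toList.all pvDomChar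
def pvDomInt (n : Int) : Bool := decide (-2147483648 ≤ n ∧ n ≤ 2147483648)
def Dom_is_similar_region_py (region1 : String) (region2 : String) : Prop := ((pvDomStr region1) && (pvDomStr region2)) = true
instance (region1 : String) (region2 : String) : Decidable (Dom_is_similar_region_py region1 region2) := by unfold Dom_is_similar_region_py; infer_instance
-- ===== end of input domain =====

-- B replaces A's loop over groups with paired membership tests by a flat reverse-index
-- dict (code -> group name) built once, then two lookups and one comparison (objective: idiomatic).

-- ===== PORT A =====
-- the for-loop over region_groups.values() with early return
def pvLoopA (region1 region2 : String) : List (List String) → Bool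
  | [] => false
  | group_regions :: rest =>
      if group_regions.contains region1 && group_regions.contains region2 then true
      else pvLoopA region1 region2 rest

def is_similar_region_py (region1 : String) (region2 : String) : Bool :=
  let region_groups : PySem.Dict String (List String) :=
    ((((PySem.Dict.empty.insert "east_asia" ["KR", "JP", "CN", "TW"]).insert
        "north_america" ["US", "CA"]).insert
        "europe" ["UK", "DE", "FR", "IT", "ES"]).insert
        "southeast_asia" ["SG", "TH", "VN", "ID", "MY"])
  pvLoopA region1 region2 region_groups.values

-- ===== PORT B =====
def pvRegionGroupsB : PySem.Dict String (List String) :=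
  ((((PySem.Dict.empty.insert "east_asia" ["KR", "JP", "CN", "TW"]).insert
      "north_america" ["US", "CA"]).insert
      "europe" ["UK", "DE", "FR", "IT", "ES"]).insert
      "southeast_asia" ["SG", "TH", "VN", "ID", "MY"])

-- the dict comprehension {code: name for name, codes in region_groups.items() for code in codes}
def pvGroupOf : PySem.Dict String String :=
  pvRegionGroupsB.items.foldl
    (fun d p => p.2.foldl (fun d code => d.insert code p.1) d) PySem.Dict.empty

def is_similar_region_py_alt (region1 : String) (region2 : String) : Bool :=
  let g1 := pvGroupOf.get? region1
  g1.isSome && (g1 == pvGroupOf.get? region2)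

-- ===== PRECONDITION & SPEC =====
def Spec_is_similar_region_py (region1 : String) (region2 : String) (out : Bool) : Prop := out = is_similar_region_py_alt region1 region2
instance (region1 : String) (region2 : String) (out : Bool) : Decidable (Spec_is_similar_region_py region1 region2 out) := by unfold Spec_is_similar_region_py; infer_instance

-- ===== CLAIM (what is proved, stated in full; the proofs are below) =====
def Claim_equal_is_similar_region_py : Prop := ∀ (region1 : String) (region2 : String), Dom_is_similar_region_py region1 region2 → Spec_is_similar_region_py region1 region2 (is_similar_region_py region1 region2)

-- ===== LEMMAS AND PROOFS =====
theorem pvGroupOf_eq : pvGroupOf = PySem.Dict.mk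
    [("KR", "east_asia"),
       ("JP", "east_asia"),
       ("CN", "east_asia"),
       ("TW", "east_asia"),
       ("US", "north_america"),
       ("CA", "north_america"),
       ("UK", "europe"),
       ("DE", "europe"),
       ("FR", "europe"),
       ("IT", "europe"),
       ("ES", "europe"),
       ("SG", "southeast_asia"),
       ("TH", "southeast_asia"),
       ("VN", "southeast_asia"),
       ("ID", "southeast_asia"),
       ("MY", "southeast_asia")] := rfl

theorem pvGet_nil (r : String) : (PySem.Dict.mk ([] : List (String × String))).get? r = none := rfl

theorem pvGroup1 (r : String) : (["KR", "JP", "CN", "TW"].contains r) = (some "east_asia" == pvGroupOf.get? r) := by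
  by_cases e1 : r = "KR"
  · subst e1; rfl
  by_cases e2 : r = "JP"
  · subst e2; rfl
  by_cases e3 : r = "CN"
  · subst e3; rfl
  by_cases e4 : r = "TW"
  · subst e4; rfl
  by_cases e5 : r = "US"
  · subst e5; rfl
  by_cases e6 : r = "CA"
  · subst e6; rfl
  by_cases e7 : r = "UK"
  · subst e7; rfl
  by_cases e8 : r = "DE"
  · subst e8; rfl
  by_cases e9 : r = "FR"
  · subst e9; rfl
  by_cases e10 : r = "IT"
  · subst e10; rfl
  by_cases e11 : r = "ES"
  · subst e11; rfl
  by_cases e12 : r = "SG"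
  · subst e12; rfl
  by_cases e13 : r = "TH"
  · subst e13; rfl
  by_cases e14 : r = "VN"
  · subst e14; rfl
  by_cases e15 : r = "ID"
  · subst e15; rfl
  by_cases e16 : r = "MY"
  · subst e16; rfl
  simp [pvGroupOf_eq, PySem.Dict.get?_mk_cons, pvGet_nil, e1, e2, e3, e4, Ne.symm e1, Ne.symm e2, Ne.symm e3, Ne.symm e4, Ne.symm e5, Ne.symm e6, Ne.symm e7, Ne.symm e8, Ne.symm e9, Ne.symm e10, Ne.symm e11, Ne.symm e12, Ne.symm e13, Ne.symm e14, Ne.symm e15, Ne.symm e16]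

theorem pvGroup2 (r : String) : (["US", "CA"].contains r) = (some "north_america" == pvGroupOf.get? r) := by
  by_cases e1 : r = "KR"
  · subst e1; rfl
  by_cases e2 : r = "JP"
  · subst e2; rfl
  by_cases e3 : r = "CN"
  · subst e3; rfl
  by_cases e4 : r = "TW"
  · subst e4; rfl
  by_cases e5 : r = "US"
  · subst e5; rfl
  by_cases e6 : r = "CA"
  · subst e6; rfl
  by_cases e7 : r = "UK"
  · subst e7; rfl
  by_cases e8 : r = "DE"
  · subst e8; rfl
  by_cases e9 : r = "FR"
  · subst e9; rfl
  by_cases e10 : r = "IT"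
  · subst e10; rfl
  by_cases e11 : r = "ES"
  · subst e11; rfl
  by_cases e12 : r = "SG"
  · subst e12; rfl
  by_cases e13 : r = "TH"
  · subst e13; rfl
  by_cases e14 : r = "VN"
  · subst e14; rfl
  by_cases e15 : r = "ID"
  · subst e15; rfl
  by_cases e16 : r = "MY"
  · subst e16; rfl
  simp [pvGroupOf_eq, PySem.Dict.get?_mk_cons, pvGet_nil, e5, e6, Ne.symm e1, Ne.symm e2, Ne.symm e3, Ne.symm e4, Ne.symm e5, Ne.symm e6, Ne.symm e7, Ne.symm e8, Ne.symm e9, Ne.symm e10, Ne.symm e11, Ne.symm e12, Ne.symm e13, Ne.symm e14, Ne.symm e15, Ne.symm e16]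

theorem pvGroup3 (r : String) : (["UK", "DE", "FR", "IT", "ES"].contains r) = (some "europe" == pvGroupOf.get? r) := by
  by_cases e1 : r = "KR"
  · subst e1; rfl
  by_cases e2 : r = "JP"
  · subst e2; rfl
  by_cases e3 : r = "CN"
  · subst e3; rfl
  by_cases e4 : r = "TW"
  · subst e4; rfl
  by_cases e5 : r = "US"
  · subst e5; rfl
  by_cases e6 : r = "CA"
  · subst e6; rfl
  by_cases e7 : r = "UK"
  · subst e7; rfl
  by_cases e8 : r = "DE"
  · subst e8; rfl
  by_cases e9 : r = "FR"
  · subst e9; rfl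
  by_cases e10 : r = "IT"
  · subst e10; rfl
  by_cases e11 : r = "ES"
  · subst e11; rfl
  by_cases e12 : r = "SG"
  · subst e12; rfl
  by_cases e13 : r = "TH"
  · subst e13; rfl
  by_cases e14 : r = "VN"
  · subst e14; rfl
  by_cases e15 : r = "ID"
  · subst e15; rfl
  by_cases e16 : r = "MY"
  · subst e16; rfl
  simp [pvGroupOf_eq, PySem.Dict.get?_mk_cons, pvGet_nil, e7, e8, e9, e10, e11, Ne.symm e1, Ne.symm e2, Ne.symm e3, Ne.symm e4, Ne.symm e5, Ne.symm e6, Ne.symm e7, Ne.symm e8, Ne.symm e9, Ne.symm e10, Ne.symm e11, Ne.symm e12, Ne.symm e13, Ne.symm e14, Ne.symm e15, Ne.symm e16]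

theorem pvGroup4 (r : String) : (["SG", "TH", "VN", "ID", "MY"].contains r) = (some "southeast_asia" == pvGroupOf.get? r) := by
  by_cases e1 : r = "KR"
  · subst e1; rfl
  by_cases e2 : r = "JP"
  · subst e2; rfl
  by_cases e3 : r = "CN"
  · subst e3; rfl
  by_cases e4 : r = "TW"
  · subst e4; rfl
  by_cases e5 : r = "US"
  · subst e5; rfl
  by_cases e6 : r = "CA"
  · subst e6; rfl
  by_cases e7 : r = "UK"
  · subst e7; rfl
  by_cases e8 : r = "DE"
  · subst e8; rfl
  by_cases e9 : r = "FR"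
  · subst e9; rfl
  by_cases e10 : r = "IT"
  · subst e10; rfl
  by_cases e11 : r = "ES"
  · subst e11; rfl
  by_cases e12 : r = "SG"
  · subst e12; rfl
  by_cases e13 : r = "TH"
  · subst e13; rfl
  by_cases e14 : r = "VN"
  · subst e14; rfl
  by_cases e15 : r = "ID"
  · subst e15; rfl
  by_cases e16 : r = "MY"
  · subst e16; rfl
  simp [pvGroupOf_eq, PySem.Dict.get?_mk_cons, pvGet_nil, e12, e13, e14, e15, e16, Ne.symm e1, Ne.symm e2, Ne.symm e3, Ne.symm e4, Ne.symm e5, Ne.symm e6, Ne.symm e7, Ne.symm e8, Ne.symm e9, Ne.symm e10, Ne.symm e11, Ne.symm e12, Ne.symm e13, Ne.symm e14, Ne.symm e15, Ne.symm e16]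

theorem pvKey (r1 r2 : String) : is_similar_region_py r1 r2 = is_similar_region_py_alt r1 r2 := by
  have hA : is_similar_region_py r1 r2 = pvLoopA r1 r2 [["KR", "JP", "CN", "TW"], ["US", "CA"], ["UK", "DE", "FR", "IT", "ES"], ["SG", "TH", "VN", "ID", "MY"]] := rfl
  rw [hA]
  by_cases e1 : r1 = "KR"
  · subst e1
    have hR : is_similar_region_py_alt "KR" r2 = (some "east_asia" == pvGroupOf.get? r2) := by
      simp [is_similar_region_py_alt, pvGroupOf_eq, PySem.Dict.get?_mk_cons]
    rw [hR, ← pvGroup1]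
    simp [pvLoopA]
  by_cases e2 : r1 = "JP"
  · subst e2
    have hR : is_similar_region_py_alt "JP" r2 = (some "east_asia" == pvGroupOf.get? r2) := by
      simp [is_similar_region_py_alt, pvGroupOf_eq, PySem.Dict.get?_mk_cons]
    rw [hR, ← pvGroup1]
    simp [pvLoopA]
  by_cases e3 : r1 = "CN"
  · subst e3
    have hR : is_similar_region_py_alt "CN" r2 = (some "east_asia" == pvGroupOf.get? r2) := by
      simp [is_similar_region_py_alt, pvGroupOf_eq, PySem.Dict.get?_mk_cons]
    rw [hR, ← pvGroup1]
    simp [pvLoopA]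
  by_cases e4 : r1 = "TW"
  · subst e4
    have hR : is_similar_region_py_alt "TW" r2 = (some "east_asia" == pvGroupOf.get? r2) := by
      simp [is_similar_region_py_alt, pvGroupOf_eq, PySem.Dict.get?_mk_cons]
    rw [hR, ← pvGroup1]
    simp [pvLoopA]
  by_cases e5 : r1 = "US"
  · subst e5
    have hR : is_similar_region_py_alt "US" r2 = (some "north_america" == pvGroupOf.get? r2) := by
      simp [is_similar_region_py_alt, pvGroupOf_eq, PySem.Dict.get?_mk_cons]
    rw [hR, ← pvGroup2]
    simp [pvLoopA]
  by_cases e6 : r1 = "CA"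
  · subst e6
    have hR : is_similar_region_py_alt "CA" r2 = (some "north_america" == pvGroupOf.get? r2) := by
      simp [is_similar_region_py_alt, pvGroupOf_eq, PySem.Dict.get?_mk_cons]
    rw [hR, ← pvGroup2]
    simp [pvLoopA]
  by_cases e7 : r1 = "UK"
  · subst e7
    have hR : is_similar_region_py_alt "UK" r2 = (some "europe" == pvGroupOf.get? r2) := by
      simp [is_similar_region_py_alt, pvGroupOf_eq, PySem.Dict.get?_mk_cons]
    rw [hR, ← pvGroup3]
    simp [pvLoopA]
  by_cases e8 : r1 = "DE"
  · subst e8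
    have hR : is_similar_region_py_alt "DE" r2 = (some "europe" == pvGroupOf.get? r2) := by
      simp [is_similar_region_py_alt, pvGroupOf_eq, PySem.Dict.get?_mk_cons]
    rw [hR, ← pvGroup3]
    simp [pvLoopA]
  by_cases e9 : r1 = "FR"
  · subst e9
    have hR : is_similar_region_py_alt "FR" r2 = (some "europe" == pvGroupOf.get? r2) := by
      simp [is_similar_region_py_alt, pvGroupOf_eq, PySem.Dict.get?_mk_cons]
    rw [hR, ← pvGroup3]
    simp [pvLoopA]
  by_cases e10 : r1 = "IT"
  · subst e10
    have hR : is_similar_region_py_alt "IT" r2 = (some "europe" == pvGroupOf.get? r2) := by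
      simp [is_similar_region_py_alt, pvGroupOf_eq, PySem.Dict.get?_mk_cons]
    rw [hR, ← pvGroup3]
    simp [pvLoopA]
  by_cases e11 : r1 = "ES"
  · subst e11
    have hR : is_similar_region_py_alt "ES" r2 = (some "europe" == pvGroupOf.get? r2) := by
      simp [is_similar_region_py_alt, pvGroupOf_eq, PySem.Dict.get?_mk_cons]
    rw [hR, ← pvGroup3]
    simp [pvLoopA]
  by_cases e12 : r1 = "SG"
  · subst e12
    have hR : is_similar_region_py_alt "SG" r2 = (some "southeast_asia" == pvGroupOf.get? r2) := by
      simp [is_similar_region_py_alt, pvGroupOf_eq, PySem.Dict.get?_mk_cons]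
    rw [hR, ← pvGroup4]
    simp [pvLoopA]
  by_cases e13 : r1 = "TH"
  · subst e13
    have hR : is_similar_region_py_alt "TH" r2 = (some "southeast_asia" == pvGroupOf.get? r2) := by
      simp [is_similar_region_py_alt, pvGroupOf_eq, PySem.Dict.get?_mk_cons]
    rw [hR, ← pvGroup4]
    simp [pvLoopA]
  by_cases e14 : r1 = "VN"
  · subst e14
    have hR : is_similar_region_py_alt "VN" r2 = (some "southeast_asia" == pvGroupOf.get? r2) := by
      simp [is_similar_region_py_alt, pvGroupOf_eq, PySem.Dict.get?_mk_cons]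
    rw [hR, ← pvGroup4]
    simp [pvLoopA]
  by_cases e15 : r1 = "ID"
  · subst e15
    have hR : is_similar_region_py_alt "ID" r2 = (some "southeast_asia" == pvGroupOf.get? r2) := by
      simp [is_similar_region_py_alt, pvGroupOf_eq, PySem.Dict.get?_mk_cons]
    rw [hR, ← pvGroup4]
    simp [pvLoopA]
  by_cases e16 : r1 = "MY"
  · subst e16
    have hR : is_similar_region_py_alt "MY" r2 = (some "southeast_asia" == pvGroupOf.get? r2) := by
      simp [is_similar_region_py_alt, pvGroupOf_eq, PySem.Dict.get?_mk_cons]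
    rw [hR, ← pvGroup4]
    simp [pvLoopA]
  simp [pvLoopA, is_similar_region_py_alt, pvGroupOf_eq, PySem.Dict.get?_mk_cons, pvGet_nil, e1, e2, e3, e4, e5, e6, e7, e8, e9, e10, e11, e12, e13, e14, e15, e16, Ne.symm e1, Ne.symm e2, Ne.symm e3, Ne.symm e4, Ne.symm e5, Ne.symm e6, Ne.symm e7, Ne.symm e8, Ne.symm e9, Ne.symm e10, Ne.symm e11, Ne.symm e12, Ne.symm e13, Ne.symm e14, Ne.symm e15, Ne.symm e16]

-- ===== VERDICT (by name: the statement is the Claim_ definition above) =====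
theorem is_similar_region_py_spec : Claim_equal_is_similar_region_py := by
  intro r1 r2 _
  unfold Spec_is_similar_region_py
  exact pvKey r1 r2
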